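-- pv_equiv track=rewrite | github.com/Jeffrey-Sardina/cod-trachtais | my_code/config/search_1/batches_2_general.py | get_val_for_iteration
-- ===== SOURCE A (Python) =====
-- def get_val_for_iteration(search_iteration):
--     '''
--     This should be the only hard-coded part
--     '''
--     import itertools
--
--     batch_size = [500, 1000, 1500, 2000]
--     num_batch_negs = [10, 50, 100, 250, 500]
--     num_uniform_negs = [10, 50, 100, 250, 500]
--     permutations = itertools.product(batch_size,
--         num_batch_negs,
--         num_uniform_negs)
--     permutations = [x for x in permutations]
--
--     for i, permutation in enumerate(permutations):
--         if i == search_iteration: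
--             return permutation
--
--     raise ValueError('invalid search_iteration value. Note: it must start at 0')
-- ===== SOURCE B (Python) =====
-- def get_val_for_iteration(search_iteration):
--     batch_size = [500, 1000, 1500, 2000]
--     num_batch_negs = [10, 50, 100, 250, 500]
--     num_uniform_negs = [10, 50, 100, 250, 500]
--
--     if search_iteration in range(len(batch_size) * len(num_batch_negs) * len(num_uniform_negs)):
--         idx = int(search_iteration)
--         b, rem = divmod(idx, len(num_batch_negs) * len(num_uniform_negs))
--         n1, n2 = divmod(rem, len(num_uniform_negs))
--         return (batch_size[b], num_batch_negs[n1], num_uniform_negs[n2])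
--
--     raise ValueError('invalid search_iteration value. Note: it must start at 0')
-- ===== Notes on version B (the rewrite author's own statement) =====
-- stated objective: simpler
-- what changed: Replaces the itertools.product list construction and the linear enumerate scan with a constant-time arithmetic index decomposition (two divmods) into the three constant lists.
import Mathlib
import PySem

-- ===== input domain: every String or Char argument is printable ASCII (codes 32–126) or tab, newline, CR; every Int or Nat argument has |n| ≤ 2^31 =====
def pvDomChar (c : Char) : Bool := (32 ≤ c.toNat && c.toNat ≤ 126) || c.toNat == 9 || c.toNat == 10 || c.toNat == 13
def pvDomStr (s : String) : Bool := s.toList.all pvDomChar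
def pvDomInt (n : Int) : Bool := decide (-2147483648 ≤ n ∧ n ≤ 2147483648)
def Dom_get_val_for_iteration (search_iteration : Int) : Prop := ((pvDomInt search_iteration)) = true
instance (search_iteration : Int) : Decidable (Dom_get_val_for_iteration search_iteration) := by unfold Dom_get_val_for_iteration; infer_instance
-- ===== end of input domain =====

-- B replaces A's itertools.product list + linear scan by a constant-time divmod index decomposition.

-- ===== PORT A =====
-- the enumerate loop of A: first permutation whose index equals search_iteration;
-- the empty case is Python's ValueError, excluded by Pre_ (default value there).
def pvScanA (si : Int) : Int → List (Int × Int × Int) → Int × Int × Int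
  | _, [] => (0, 0, 0)
  | i, p :: rest => if i == si then p else pvScanA si (i + 1) rest

def get_val_for_iteration (search_iteration : Int) : Int × Int × Int :=
  let batch_size : List Int := [500, 1000, 1500, 2000]
  let num_batch_negs : List Int := [10, 50, 100, 250, 500]
  let num_uniform_negs : List Int := [10, 50, 100, 250, 500]
  let permutations : List (Int × Int × Int) :=
    batch_size.flatMap (fun b =>
      num_batch_negs.flatMap (fun n1 =>
        num_uniform_negs.map (fun n2 => (b, n1, n2))))
  pvScanA search_iteration 0 permutations

-- ===== PORT B =====
def get_val_for_iteration_alt (search_iteration : Int) : Int × Int × Int :=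
  let batch_size : List Int := [500, 1000, 1500, 2000]
  let num_batch_negs : List Int := [10, 50, 100, 250, 500]
  let num_uniform_negs : List Int := [10, 50, 100, 250, 500]
  if 0 ≤ search_iteration ∧
      search_iteration < (batch_size.length * num_batch_negs.length * num_uniform_negs.length : Int) then
    let nb : Int := (num_batch_negs.length : Int)
    let nu : Int := (num_uniform_negs.length : Int)
    let b := PySem.Int.floordiv search_iteration (nb * nu)
    let rem := PySem.Int.mod search_iteration (nb * nu)
    let n1 := PySem.Int.floordiv rem nu
    let n2 := PySem.Int.mod rem nu
    ((PySem.List.pyGet? batch_size b).getD 0, (PySem.List.pyGet? num_batch_negs n1).getD 0, (PySem.List.pyGet? num_uniform_negs n2).getD 0)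
  else
    (0, 0, 0)  -- Python raises ValueError here; excluded by Pre_

-- ===== PRECONDITION & SPEC =====
-- A raises ValueError outside 0 ≤ search_iteration < 100.
def Pre_get_val_for_iteration (search_iteration : Int) : Prop :=
  0 ≤ search_iteration ∧ search_iteration < 100
instance (search_iteration : Int) : Decidable (Pre_get_val_for_iteration search_iteration) := by
  unfold Pre_get_val_for_iteration; infer_instance
def pvWitness_get_val_for_iteration : Int := (37)

def Spec_get_val_for_iteration (search_iteration : Int) (out : Int × Int × Int) : Prop := out = get_val_for_iteration_alt search_iteration
instance (search_iteration : Int) (out : Int × Int × Int) : Decidable (Spec_get_val_for_iteration search_iteration out) := by unfold Spec_get_val_for_iteration; infer_instance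

-- ===== CLAIM (what is proved, stated in full; the proofs are below) =====
def Claim_equal_get_val_for_iteration : Prop := ∀ (search_iteration : Int), Dom_get_val_for_iteration search_iteration → Pre_get_val_for_iteration search_iteration → Spec_get_val_for_iteration search_iteration (get_val_for_iteration search_iteration)

-- ===== LEMMAS AND PROOFS =====

-- ===== VERDICT (by name: the statement is the Claim_ definition above) =====
theorem get_val_for_iteration_spec : Claim_equal_get_val_for_iteration := by
  intro si _ hpre
  unfold Spec_get_val_for_iteration
  obtain ⟨h0, h1⟩ := hpre
  interval_cases si <;> decide
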